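-- pv_equiv track=rewrite | github.com/WilliamRayJohnson/dailyProgrammer | challenges/336[easy]/cannibalNumbers.py | countCannibals
-- ===== SOURCE A (Python) =====
-- def countCannibals(targetValue, numberSet):
--     numberSet.sort()
--     numberSet = numberSet[::-1]
--     cannibalCount = 0
--     while 0 < len(numberSet):
--         if numberSet[0] >= targetValue:
--             cannibalCount += 1
--             numberSet = numberSet[1:]
--         elif len(numberSet) >= 2:
--             if numberSet[0] > numberSet[1]:
--                 numberSet[0] += 1
--                 numberSet = numberSet[:len(numberSet)-1]
--             else:
--                 numberSet = numberSet[1:]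
--         else:
--             numberSet = numberSet[1:]
--     return cannibalCount
-- ===== SOURCE B (Python) =====
-- def countCannibals(targetValue, numberSet):
--     d = sorted(numberSet)[::-1]
--     count = 0
--     i, j = 0, len(d) - 1
--     while i <= j:
--         v = d[i]
--         if v >= targetValue:
--             count += 1
--             i += 1
--         elif i < j and v > d[i + 1]:
--             need = targetValue - v
--             if need <= j - i:
--                 count += 1
--                 j -= need
--                 i += 1
--             else:
--                 break
--         else:
--             i += 1
--     return count
-- ===== Notes on version B (the rewrite author's own statement) =====
-- stated objective: faster
-- what changed: Replace A's per-step list slicing and one-eat-at-a-time while loop by a two-pointer scan over the sorted array that computes each head's whole eating run in one arithmetic jump (j -= targetValue - v).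
import Mathlib
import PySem

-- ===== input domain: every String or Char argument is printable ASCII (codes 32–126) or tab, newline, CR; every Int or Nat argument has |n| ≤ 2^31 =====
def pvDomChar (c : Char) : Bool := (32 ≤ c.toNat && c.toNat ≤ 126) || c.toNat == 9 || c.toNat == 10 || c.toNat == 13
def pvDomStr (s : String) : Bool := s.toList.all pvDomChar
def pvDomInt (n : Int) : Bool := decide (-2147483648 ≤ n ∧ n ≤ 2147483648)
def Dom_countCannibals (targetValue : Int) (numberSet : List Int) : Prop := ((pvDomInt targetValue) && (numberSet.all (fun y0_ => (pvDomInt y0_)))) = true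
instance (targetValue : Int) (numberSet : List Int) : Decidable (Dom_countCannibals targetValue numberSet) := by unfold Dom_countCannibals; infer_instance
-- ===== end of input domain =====

-- B replaces A's quadratic slice-per-step simulation by a two-pointer scan over the sorted
-- array whose eating runs are collapsed into one arithmetic jump; equivalence is about the
-- return value only (A sorts its argument in place, B does not mutate it).

-- ===== PORT A =====
-- while loop over the current list (fuel = current length, one unit per iteration: a pure
-- totality guard, each iteration shortens the list by exactly one);
-- each iteration mirrors A's branches exactly
def countCannibalsLoopA (targetValue : Int) : Nat → List Int → Int → Int
  | 0, _, cannibalCount => cannibalCount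
  | _ + 1, [], cannibalCount => cannibalCount
  | fuel + 1, x :: rest, cannibalCount =>
    if x ≥ targetValue then
      countCannibalsLoopA targetValue fuel rest (cannibalCount + 1)       -- numberSet = numberSet[1:]
    else
      match rest with
      | y :: rest' =>                                                     -- len(numberSet) >= 2
        if x > y then
          -- numberSet[0] += 1; numberSet = numberSet[:len-1]  (drop the last element)
          countCannibalsLoopA targetValue fuel (((x + 1) :: y :: rest').dropLast) cannibalCount
        else
          countCannibalsLoopA targetValue fuel (y :: rest') cannibalCount -- numberSet = numberSet[1:]
      | [] =>
        countCannibalsLoopA targetValue fuel [] cannibalCount             -- numberSet = numberSet[1:]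

def countCannibals (targetValue : Int) (numberSet : List Int) : Int :=
  -- numberSet.sort(); numberSet = numberSet[::-1]  (reverse of the stable ascending sort)
  countCannibalsLoopA targetValue ((PySem.List.sorted numberSet (fun x => x) false).reverse).length
    ((PySem.List.sorted numberSet (fun x => x) false).reverse) 0

-- ===== PORT B =====
-- two pointers i ≤ j into the fixed descending array d; an eating run is one jump
-- (fuel = segment width j + 1 - i, a pure totality guard: it shrinks by at least one per step)
def countCannibalsLoopB (targetValue : Int) (d : List Int) : Nat → Nat → Nat → Int → Int
  | 0, _, _, acc => acc
  | fuel + 1, i, j, acc =>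
    if i ≤ j then
      let v := d.getD i 0
      if v ≥ targetValue then
        countCannibalsLoopB targetValue d fuel (i + 1) j (acc + 1)
      else if i < j ∧ v > d.getD (i + 1) 0 then
        let need := targetValue - v
        if need ≤ (j : Int) - (i : Int) then
          countCannibalsLoopB targetValue d fuel (i + 1) (j - need.toNat) (acc + 1)
        else acc                                                          -- break
      else
        countCannibalsLoopB targetValue d fuel (i + 1) j acc
    else acc

def countCannibals_alt (targetValue : Int) (numberSet : List Int) : Int :=
  let d := (PySem.List.sorted numberSet (fun x => x) false).reverse       -- sorted(numberSet)[::-1]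
  match d with
  | [] => 0                                                               -- j = -1, loop not entered
  | _ :: _ => countCannibalsLoopB targetValue d d.length 0 (d.length - 1) 0

-- ===== PRECONDITION & SPEC =====
def Spec_countCannibals (targetValue : Int) (numberSet : List Int) (out : Int) : Prop := out = countCannibals_alt targetValue numberSet
instance (targetValue : Int) (numberSet : List Int) (out : Int) : Decidable (Spec_countCannibals targetValue numberSet out) := by unfold Spec_countCannibals; infer_instance

-- ===== CLAIM (what is proved, stated in full; the proofs are below) =====
def Claim_equal_countCannibals : Prop := ∀ (targetValue : Int) (numberSet : List Int), Dom_countCannibals targetValue numberSet → Spec_countCannibals targetValue numberSet (countCannibals targetValue numberSet)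

-- ===== LEMMAS AND PROOFS =====

-- A's loop always runs with fuel = current length (every step shortens the list by one),
-- so we reason about this abbreviation
def runA (t : Int) (l : List Int) (acc : Int) : Int := countCannibalsLoopA t l.length l acc

-- one-step unfolding lemmas for A's loop
lemma runA_nil (t acc : Int) : runA t [] acc = acc := rfl

lemma runA_ge (t x : Int) (rest : List Int) (acc : Int) (h : x ≥ t) :
    runA t (x :: rest) acc = runA t rest (acc + 1) := by
  simp [runA, countCannibalsLoopA, h]

lemma runA_single (t x acc : Int) (h : ¬ x ≥ t) : runA t [x] acc = acc := by
  simp [runA, countCannibalsLoopA, h]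

lemma runA_skip (t x y : Int) (rs : List Int) (acc : Int) (h : ¬ x ≥ t) (hle : ¬ x > y) :
    runA t (x :: y :: rs) acc = runA t (y :: rs) acc := by
  simp [runA, countCannibalsLoopA, h, hle]

lemma runA_eat (t x y : Int) (rs : List Int) (acc : Int) (h : ¬ x ≥ t) (hgt : x > y) :
    runA t (x :: y :: rs) acc = runA t (((x + 1) :: y :: rs).dropLast) acc := by
  simp [runA, countCannibalsLoopA, h, hgt]

-- An eating run of A collapsed: head v (< t) strictly above the next element y eats from the
-- back one element per step; it either reaches t after t - v meals and is then counted, or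
-- runs out of food and is discarded.
lemma eatRun (t y : Int) : ∀ (n : Nat) (rs : List Int) (v acc : Int), rs.length = n →
    v < t → v > y →
    runA t (v :: y :: rs) acc =
      if t - v ≤ (n : Int) + 1 then
        runA t ((y :: rs).take (n + 1 - (t - v).toNat)) (acc + 1)
      else acc := by
  intro n
  induction n with
  | zero =>
    intro rs v acc hlen hv hvy
    have hrs : rs = [] := List.length_eq_zero_iff.mp hlen
    subst hrs
    rw [runA_eat t v y [] acc (by omega) hvy]
    show runA t [v + 1] acc = _
    by_cases h1 : v + 1 ≥ t
    · rw [if_pos (by omega)]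
      have : 1 - (t - v).toNat = 0 := by omega
      rw [this, List.take_zero]
      rw [runA_ge t (v + 1) [] acc h1, runA_nil]
    · rw [if_neg (by omega), runA_single t (v + 1) acc h1]
  | succ n ih =>
    intro rs v acc hlen hv hvy
    have hrs : rs ≠ [] := by intro h; simp [h] at hlen
    rw [runA_eat t v y rs acc (by omega) hvy]
    have hdl : ((v + 1) :: y :: rs).dropLast = (v + 1) :: y :: rs.dropLast := by
      have : (y :: rs).dropLast = y :: rs.dropLast := by
        cases rs with
        | nil => exact absurd rfl hrs
        | cons a l => rfl
      simp [List.dropLast_cons₂, this]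
    rw [hdl]
    have hlen' : rs.dropLast.length = n := by
      simp [List.length_dropLast, hlen]
    by_cases h1 : v + 1 < t
    · rw [ih rs.dropLast (v + 1) acc hlen' h1 (by omega)]
      have hcond : (t - (v + 1) ≤ (n : Int) + 1) ↔ (t - v ≤ (n : Int) + 1 + 1) := by omega
      by_cases hc : t - v ≤ (n : Int) + 1 + 1
      · rw [if_pos (hcond.mpr hc), if_pos (by push_cast; omega)]
        congr 1
        have htv : 2 ≤ (t - v).toNat := by omega
        have h2 : n + 1 - (t - (v + 1)).toNat = n + 1 + 1 - (t - v).toNat := by omega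
        rw [h2]
        have hk : n + 1 + 1 - (t - v).toNat ≤ n := by omega
        cases hk' : n + 1 + 1 - (t - v).toNat with
        | zero => simp
        | succ m =>
          rw [List.take_succ_cons, List.take_succ_cons]
          congr 1
          rw [List.dropLast_eq_take, List.take_take]
          congr 1
          omega
      · rw [if_neg (fun h => hc (hcond.mp h)), if_neg (by push_cast at hc ⊢; omega)]
    · -- v + 1 = t : the head is counted on the next step
      have ht : t = v + 1 := by omega
      rw [runA_ge t (v + 1) (y :: rs.dropLast) acc (by omega)]
      rw [if_pos (by omega)]
      congr 1
      have : n + 1 + 1 - (t - v).toNat = n + 1 := by omega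
      rw [this]
      have : (y :: rs).take (n + 1) = (y :: rs).dropLast := by
        rw [List.dropLast_eq_take]
        congr 1
        simp [hlen]
      rw [this]
      cases rs with
      | nil => exact absurd rfl hrs
      | cons a l => rfl

-- loopB on pointers (i, j) computes A's loop on the segment d[i..j]
lemma loopB_eq_runA (t : Int) (d : List Int) : ∀ (k fuel i j : Nat) (acc : Int),
    j + 1 - i = k → j + 1 - i ≤ fuel → j < d.length →
    countCannibalsLoopB t d fuel i j acc = runA t ((d.drop i).take (j + 1 - i)) acc := by
  have hseg : ∀ (i' j' : Nat), i' ≤ j' → j' < d.length →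
      (d.drop i').take (j' + 1 - i') = d.getD i' 0 :: (d.drop (i' + 1)).take (j' - i') := by
    intro i' j' h1 h2
    have hi' : i' < d.length := Nat.lt_of_le_of_lt h1 h2
    rw [List.drop_eq_getElem_cons hi', (by omega : j' + 1 - i' = (j' - i') + 1),
      List.take_succ_cons, List.getD_eq_getElem d 0 hi']
  intro k
  induction k using Nat.strong_induction_on with
  | _ k IH =>
  intro fuel i j acc hk hfuel hj
  by_cases hij : i ≤ j
  · obtain ⟨f, rfl⟩ : ∃ f, fuel = f + 1 := ⟨fuel - 1, by omega⟩
    rw [countCannibalsLoopB, if_pos hij]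
    rw [hseg i j hij hj]
    by_cases h1 : d.getD i 0 ≥ t
    · rw [if_pos h1, runA_ge t _ _ _ h1]
      rw [IH (j + 1 - (i + 1)) (by omega) f (i + 1) j (acc + 1) rfl (by omega) hj]
      rw [(by omega : j + 1 - (i + 1) = j - i)]
    · rw [if_neg h1]
      by_cases h2 : i < j ∧ d.getD i 0 > d.getD (i + 1) 0
      · rw [if_pos h2]
        obtain ⟨hij', hgt⟩ := h2
        have hseg2 : (d.drop (i + 1)).take (j - i) =
            d.getD (i + 1) 0 :: (d.drop (i + 2)).take (j - (i + 1)) := by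
          have h := hseg (i + 1) j hij' hj
          rwa [(by omega : j + 1 - (i + 1) = j - i)] at h
        rw [hseg2]
        have hlenrs : ((d.drop (i + 2)).take (j - (i + 1))).length = j - (i + 1) := by
          simp [List.length_take, List.length_drop]; omega
        rw [eatRun t (d.getD (i + 1) 0) (j - (i + 1)) _ (d.getD i 0) acc hlenrs (by omega) hgt]
        by_cases hc : t - d.getD i 0 ≤ (j : Int) - (i : Int)
        · rw [if_pos hc, if_pos (by omega)]
          have he1 : 1 ≤ (t - d.getD i 0).toNat := by omega
          have hce : (t - d.getD i 0).toNat ≤ j - i := by omega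
          rw [IH ((j - (t - d.getD i 0).toNat) + 1 - (i + 1)) (by omega) f (i + 1)
            (j - (t - d.getD i 0).toNat) (acc + 1) rfl (by omega) (by omega)]
          rw [← hseg2, List.take_take]
          rw [(by omega : (j - (t - d.getD i 0).toNat) + 1 - (i + 1)
            = min (j - (i + 1) + 1 - (t - d.getD i 0).toNat) (j - i))]
        · rw [if_neg hc, if_neg (by omega)]
      · rw [if_neg h2]
        rw [IH (j + 1 - (i + 1)) (by omega) f (i + 1) j acc rfl (by omega) hj]
        rw [(by omega : j + 1 - (i + 1) = j - i)]
        by_cases hij' : i < j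
        · have hseg2 : (d.drop (i + 1)).take (j - i) =
              d.getD (i + 1) 0 :: (d.drop (i + 2)).take (j - (i + 1)) := by
            have h := hseg (i + 1) j hij' hj
            rwa [(by omega : j + 1 - (i + 1) = j - i)] at h
          rw [hseg2, runA_skip t _ _ _ _ h1 (fun h => h2 ⟨hij', h⟩)]
        · rw [(by omega : j - i = 0), List.take_zero, runA_single t _ _ h1, runA_nil]
  · rw [(by omega : j + 1 - i = 0), List.take_zero, runA_nil]
    cases fuel with
    | zero => rfl
    | succ f => rw [countCannibalsLoopB, if_neg hij]

-- ===== VERDICT (by name: the statement is the Claim_ definition above) =====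
theorem countCannibals_spec : Claim_equal_countCannibals := by
  intro t ns _
  unfold Spec_countCannibals countCannibals countCannibals_alt
  cases hd : (PySem.List.sorted ns (fun x => x) false).reverse with
  | nil => exact runA_nil t 0
  | cons a l =>
    show runA t (a :: l) 0 = countCannibalsLoopB t (a :: l) (a :: l).length 0 ((a :: l).length - 1) 0
    rw [loopB_eq_runA t (a :: l) ((a :: l).length - 1 + 1 - 0) (a :: l).length 0
      ((a :: l).length - 1) 0 rfl (by simp) (by simp)]
    simp [runA]
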